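-- pv_equiv track=rewrite | github.com/PetrovSt89/basic_exercises | for_dict_challenges.py | diction_name_count
-- ===== SOURCE A (Python) =====
-- def diction_name_count(lis):
--     repeat = {}
--     for key_name in range(len(lis)):
--         name = lis[key_name]['first_name']
--         if name not in repeat:
--             repeat[name] = 1
--         else:
--             repeat[name] += 1
--     return repeat
-- ===== SOURCE B (Python) =====
-- def diction_name_count(lis):
--     names = [d['first_name'] for d in lis]
--     return {n: names.count(n) for n in names}
-- ===== Notes on version B (the rewrite author's own statement) =====
-- stated objective: simpler
-- what changed: Replaces A's explicit index loop with membership-tested increments by a two-phase decomposition: extract the names once, then build the result in a single dict comprehension whose values are names.count(n).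
import Mathlib
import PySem

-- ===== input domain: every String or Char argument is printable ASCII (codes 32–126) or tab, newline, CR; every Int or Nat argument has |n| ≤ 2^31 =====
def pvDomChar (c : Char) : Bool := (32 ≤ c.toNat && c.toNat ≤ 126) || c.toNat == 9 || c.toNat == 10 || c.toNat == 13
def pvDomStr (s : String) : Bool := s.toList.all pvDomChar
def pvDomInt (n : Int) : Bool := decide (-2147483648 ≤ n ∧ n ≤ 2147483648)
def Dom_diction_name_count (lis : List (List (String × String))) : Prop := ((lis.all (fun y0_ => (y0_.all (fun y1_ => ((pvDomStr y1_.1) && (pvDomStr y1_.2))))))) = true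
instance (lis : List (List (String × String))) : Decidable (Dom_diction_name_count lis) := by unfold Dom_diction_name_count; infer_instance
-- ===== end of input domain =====

-- B replaces A's explicit index loop with membership-tested increments by a two-phase
-- decomposition (extract the names, then a dict comprehension over them with count);
-- objective: simpler. Equality of the RETURN value is what is proved.

-- ===== PORT A =====
def diction_name_count (lis : List (List (String × String))) : List (String × Int) :=
  ((PySem.List.pyRange 0 (PySem.List.len lis)).foldl
    (fun rep key_name =>
      let name := (PySem.Dict.mk (PySem.List.pyGetD lis key_name [])).getD "first_name" ""
      if rep.contains name = false then rep.insert name 1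
      else rep.insert name (rep.getD name 0 + 1))
    PySem.Dict.empty).items

-- ===== PORT B =====
def diction_name_count_alt (lis : List (List (String × String))) : List (String × Int) :=
  let names := lis.map (fun d => (PySem.Dict.mk d).getD "first_name" "")
  (names.foldl (fun res n => res.insert n ((PySem.List.count names n : Int)))
    PySem.Dict.empty).items

-- ===== PRECONDITION & SPEC =====
-- Pre_ excludes exactly the inputs where A raises KeyError: an inner dict without the key 'first_name'.
def Pre_diction_name_count (lis : List (List (String × String))) : Prop :=
  ∀ d ∈ lis, (PySem.Dict.mk d).contains "first_name" = true
instance (lis : List (List (String × String))) : Decidable (Pre_diction_name_count lis) := by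
  unfold Pre_diction_name_count; infer_instance
def pvWitness_diction_name_count : (List (List (String × String))) :=
  [[("first_name", "anna")], [("first_name", "bo"), ("x", "y")], [("first_name", "anna")]]

def Spec_diction_name_count (lis : List (List (String × String))) (out : List (String × Int)) : Prop := out = diction_name_count_alt lis
instance (lis : List (List (String × String))) (out : List (String × Int)) : Decidable (Spec_diction_name_count lis out) := by unfold Spec_diction_name_count; infer_instance

-- ===== CLAIM (what is proved, stated in full; the proofs are below) =====
def Claim_equal_diction_name_count : Prop := ∀ (lis : List (List (String × String))), Dom_diction_name_count lis → Pre_diction_name_count lis → Spec_diction_name_count lis (diction_name_count lis)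

-- ===== LEMMAS AND PROOFS =====

-- A's loop over indices is the counter of the extracted name list.
theorem dncA_eq_counter_items (lis : List (List (String × String))) :
    diction_name_count lis
      = (PySem.Dict.counter
          (lis.map (fun d => (PySem.Dict.mk d).getD "first_name" ""))).items := by
  unfold diction_name_count
  have h := PySem.List.foldl_pyRange_pyGetD lis []
    (fun rep d =>
      let name := (PySem.Dict.mk d).getD "first_name" ""
      if rep.contains name = false then rep.insert name 1
      else rep.insert name (rep.getD name 0 + 1))
    (PySem.Dict.empty : PySem.Dict String Int) (a := 0) le_rfl
  simp only [Int.toNat_zero, List.drop_zero] at h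
  rw [h]
  rw [show (List.foldl
      (fun rep d =>
        let name := (PySem.Dict.mk d).getD "first_name" ""
        if rep.contains name = false then rep.insert name 1
        else rep.insert name (rep.getD name 0 + 1))
      (PySem.Dict.empty : PySem.Dict String Int) lis)
    = List.foldl (fun rep x => rep.insert x (rep.getD x 0 + 1)) PySem.Dict.empty
        (lis.map (fun d => (PySem.Dict.mk d).getD "first_name" "")) from ?_]
  · rw [PySem.Dict.foldl_insert_getD_add_one_eq_counter]
  · rw [List.foldl_map]
    refine PySem.List.foldl_congr_mem _ _ _ _ (fun rep d _ => ?_)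
    by_cases hc : rep.contains ((PySem.Dict.mk d).getD "first_name" "") = true
    · simp [hc]
    · simp only [Bool.not_eq_true] at hc
      simp [hc, PySem.Dict.getD_of_not_contains _ _ hc]

-- B's comprehension: inserting a key-determined value along xs yields one item per distinct key.
theorem dncB_fold_items {f : String → Int} (xs : List String) :
    (xs.foldl (fun res n => res.insert n (f n)) (PySem.Dict.empty : PySem.Dict String Int)).items
      = (PySem.Set.ofList xs).map (fun k => (k, f k)) := by
  induction xs using List.reverseRecOn with
  | nil => rfl
  | append_singleton xs x ih =>
    rw [List.foldl_append, List.foldl_cons, List.foldl_nil, PySem.Set.ofList_append_singleton]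
    have hkeys : (xs.foldl (fun res n => res.insert n (f n))
        (PySem.Dict.empty : PySem.Dict String Int)).keys = PySem.Set.ofList xs := by
      rw [PySem.Dict.keys_foldl_insert xs (fun _ n => f n)]
      simp [PySem.Set.update_eq_foldl, PySem.Set.ofList_eq_foldl, PySem.Dict.keys, PySem.Dict.empty]
    by_cases hx : x ∈ xs
    · have hcont : (xs.foldl (fun res n => res.insert n (f n))
          (PySem.Dict.empty : PySem.Dict String Int)).contains x = true := by
        rw [PySem.Dict.contains_iff_mem_keys, hkeys, PySem.Set.mem_ofList]; exact hx
      rw [PySem.Dict.items_insert_of_contains _ _ hcont, ih]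
      have hadd : PySem.Set.add (PySem.Set.ofList xs) x = PySem.Set.ofList xs := by
        simp [PySem.Set.add, PySem.Set.mem_ofList, hx]
      rw [hadd, List.map_map]
      refine List.map_congr_left (fun k _ => ?_)
      by_cases hk : k = x
      · subst hk; simp
      · simp [hk]
    · have hcont : (xs.foldl (fun res n => res.insert n (f n))
          (PySem.Dict.empty : PySem.Dict String Int)).contains x = false := by
        rw [← Bool.not_eq_true, PySem.Dict.contains_iff_mem_keys, hkeys, PySem.Set.mem_ofList]
        exact hx
      rw [PySem.Dict.items_insert, hcont, ih]
      have hadd : PySem.Set.add (PySem.Set.ofList xs) x = PySem.Set.ofList xs ++ [x] := by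
        simp [PySem.Set.add, PySem.Set.mem_ofList, hx]
      simp [hadd]

-- ===== VERDICT (by name: the statement is the Claim_ definition above) =====
theorem diction_name_count_spec : Claim_equal_diction_name_count := by
  intro lis _ _
  unfold Spec_diction_name_count
  rw [dncA_eq_counter_items, PySem.Dict.items_counter]
  unfold diction_name_count_alt
  rw [dncB_fold_items]
  refine (List.map_congr_left (fun k _ => ?_)).symm
  simp [PySem.List.count]
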